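-- pv_equiv track=rewrite | github.com/huwf1220/ptp_parallel | alpa/shard_parallel/direct_profile_exp.py | enumerate_lists
-- ===== SOURCE A (Python) =====
-- from typing import Callable, Sequence, Optional, Union
--
-- def enumerate_lists(arr: Sequence[int]):
--     n = len(arr)
--     result = []
--     for i in range(arr[0]):
--         if n == 1:
--             result.append([i])
--         else:
--             sub_lists = enumerate_lists(arr[1:])
--             for sub_list in sub_lists:
--                 result.append([i] + sub_list)
--     return result
-- ===== SOURCE B (Python) =====
-- def enumerate_lists(arr):
--     if any(b <= 0 for b in arr):
--         return []
--     result = [[]]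
--     for b in reversed(arr):
--         result = [[i] + r for i in range(b) for r in result]
--     return result
-- ===== Notes on version B (the rewrite author's own statement) =====
-- stated objective: alternative
-- what changed: replaces the recursion that recomputes enumerate_lists(arr[1:]) inside every iteration of the outer loop by a single right-to-left fold building the product once per position, with an early [] return when any bound is nonpositive
-- outside the precondition, e.g. on enumerate_lists([]): A raises IndexError, B returns [[]]
import Mathlib
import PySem

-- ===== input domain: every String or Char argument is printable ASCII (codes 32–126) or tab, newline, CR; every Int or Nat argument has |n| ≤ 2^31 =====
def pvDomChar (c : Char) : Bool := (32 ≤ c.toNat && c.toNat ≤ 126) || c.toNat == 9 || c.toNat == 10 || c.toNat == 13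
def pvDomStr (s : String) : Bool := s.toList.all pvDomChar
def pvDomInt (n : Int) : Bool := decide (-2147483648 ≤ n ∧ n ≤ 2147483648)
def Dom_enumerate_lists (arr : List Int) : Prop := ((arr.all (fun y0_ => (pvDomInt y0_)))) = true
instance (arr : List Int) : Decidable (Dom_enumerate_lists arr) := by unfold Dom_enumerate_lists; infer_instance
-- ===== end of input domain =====

-- B replaces A's per-iteration recomputation of the tail enumeration by one right-to-left
-- fold over the bounds, with an early [] when some bound is nonpositive. Return values only.

-- ===== PORT A =====
-- A recurses on arr[1:], recomputing enumerate_lists(arr[1:]) inside every loop iteration.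
def enumerate_lists (arr : List Int) : List (List Int) :=
  match arr with
  | [] => []   -- unreachable under Pre_: Python raises IndexError on arr[0]
  | _ :: rest =>
    (PySem.List.pyRange 0 (match arr with | [] => 0 | a :: _ => a) 1).foldl
      (fun result i =>
        if rest = [] then result ++ [[i]]
        else result ++ (enumerate_lists rest).map (fun s => i :: s)) []

-- ===== PORT B =====
def pvProdLists (arr : List Int) : List (List Int) :=
  arr.foldr
    (fun b result => (PySem.List.pyRange 0 b 1).flatMap (fun i => result.map (fun r => i :: r)))
    [[]]

def enumerate_lists_alt (arr : List Int) : List (List Int) :=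
  if arr.any (fun b => b ≤ 0) then [] else pvProdLists arr

-- ===== PRECONDITION & SPEC =====
-- Pre_ excludes only the empty list, on which Python A raises IndexError (arr[0]).
def Pre_enumerate_lists (arr : List Int) : Prop := arr ≠ []
instance (arr : List Int) : Decidable (Pre_enumerate_lists arr) := by unfold Pre_enumerate_lists; infer_instance
def pvWitness_enumerate_lists : List Int := ([2, 3])

def Spec_enumerate_lists (arr : List Int) (out : List (List Int)) : Prop := out = enumerate_lists_alt arr
instance (arr : List Int) (out : List (List Int)) : Decidable (Spec_enumerate_lists arr out) := by unfold Spec_enumerate_lists; infer_instance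

-- ===== CLAIM (what is proved, stated in full; the proofs are below) =====
def Claim_equal_enumerate_lists : Prop := ∀ (arr : List Int), Dom_enumerate_lists arr → Pre_enumerate_lists arr → Spec_enumerate_lists arr (enumerate_lists arr)

-- ===== LEMMAS AND PROOFS =====
theorem pyRange_nonpos {a : Int} (h : a ≤ 0) : PySem.List.pyRange 0 a 1 = [] := by
  rw [PySem.List.pyRange_one]
  simp
  omega

theorem pvProdLists_eq_nil {arr : List Int} (h : arr.any (fun b => b ≤ 0)) : pvProdLists arr = [] := by
  induction arr with
  | nil => simp at h
  | cons a rest ih =>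
    simp only [List.any_cons, Bool.or_eq_true, decide_eq_true_eq] at h
    rcases h with h | h
    · simp [pvProdLists, pyRange_nonpos h]
    · simp only [pvProdLists, List.foldr]
      rw [show rest.foldr (fun b result => (PySem.List.pyRange 0 b 1).flatMap (fun i => result.map (fun r => i :: r))) [[]] = pvProdLists rest from rfl, ih h]
      simp

theorem enumerate_lists_eq_prod : ∀ (arr : List Int), arr ≠ [] → enumerate_lists arr = pvProdLists arr := by
  intro arr
  induction arr with
  | nil => intro h; exact absurd rfl h
  | cons a rest ih =>
    intro _
    cases rest with
    | nil =>
      rw [enumerate_lists]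
      simp only [if_pos rfl]
      simp [pvProdLists, List.flatMap]
    | cons b t =>
      have hne : (b :: t : List Int) ≠ [] := by simp
      rw [enumerate_lists]
      simp only [if_neg hne]
      rw [PySem.List.foldl_append_eq_flatMap, ih hne]
      simp [pvProdLists]

-- ===== VERDICT (by name: the statement is the Claim_ definition above) =====
theorem enumerate_lists_spec : Claim_equal_enumerate_lists := by
  intro arr _ hpre
  show enumerate_lists arr = enumerate_lists_alt arr
  unfold enumerate_lists_alt
  split
  · next h => rw [enumerate_lists_eq_prod arr hpre, pvProdLists_eq_nil h]
  · exact enumerate_lists_eq_prod arr hpre
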